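-- pv_equiv track=rewrite | github.com/Naveeng007/Implementing-SSL | utils/convertors.py | req_bytes
-- ===== SOURCE A (Python) =====
-- import math
--
-- def req_bytes(n: int):
--     if n < 1:
--         return 1
--
--     length = 0
--     while n > 0:
--         n >>= 1
--         length += 1
--
--     return int(math.ceil(length / 8))
-- ===== SOURCE B (Python) =====
-- def req_bytes(n: int):
--     if n < 1:
--         return 1
--     return (n.bit_length() + 7) // 8
-- ===== Notes on version B (the rewrite author's own statement) =====
-- stated objective: idiomatic
-- what changed: Replaces the bit-counting while-loop plus float math.ceil with a closed-form integer expression (n.bit_length() + 7) // 8.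
import Mathlib
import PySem

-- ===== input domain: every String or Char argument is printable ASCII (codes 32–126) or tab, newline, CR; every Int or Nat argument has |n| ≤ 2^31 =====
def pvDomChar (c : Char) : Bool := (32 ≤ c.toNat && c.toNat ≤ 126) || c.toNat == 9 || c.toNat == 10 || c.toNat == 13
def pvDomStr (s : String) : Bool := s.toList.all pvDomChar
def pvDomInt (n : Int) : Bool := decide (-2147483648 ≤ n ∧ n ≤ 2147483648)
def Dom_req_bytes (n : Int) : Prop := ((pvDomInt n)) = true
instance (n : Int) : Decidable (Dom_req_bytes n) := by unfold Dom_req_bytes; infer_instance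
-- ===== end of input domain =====

-- B replaces A's bit-counting while-loop and float math.ceil with the closed form (bit_length + 7) // 8.


-- ===== PORT A =====
-- the 'while n > 0: n >>= 1; length += 1' loop; terminates since n >>> 1 halves a positive n
def reqLoop (n : Int) (length : Int) : Int :=
  if n > 0 then reqLoop (n >>> (1:Nat)) (length + 1) else length
  termination_by n.toNat
  decreasing_by
    rw [Int.shiftRight_eq_div_pow]
    norm_num
    omega

def req_bytes (n : Int) : Int :=
  if n < 1 then 1
  else
    -- int(math.ceil(length / 8)) ported as exact integer ceiling division (length ≤ 32 here, so the float is exact)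
    -(PySem.Int.floordiv (-(reqLoop n 0)) 8)

-- ===== PORT B =====
def req_bytes_alt (n : Int) : Int :=
  if n < 1 then 1
  else PySem.Int.floordiv ((PySem.Int.bitLength n : Int) + 7) 8

-- ===== PRECONDITION & SPEC =====
def Spec_req_bytes (n : Int) (out : Int) : Prop := out = req_bytes_alt n
instance (n : Int) (out : Int) : Decidable (Spec_req_bytes n out) := by unfold Spec_req_bytes; infer_instance

-- ===== CLAIM (what is proved, stated in full; the proofs are below) =====
def Claim_equal_req_bytes : Prop := ∀ (n : Int), Dom_req_bytes n → Spec_req_bytes n (req_bytes n)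

-- ===== LEMMAS AND PROOFS =====

lemma reqLoop_eq (m : Nat) : ∀ (acc : Int), reqLoop (m : Int) acc = acc + (PySem.Int.bitLength (m : Int) : Int) := by
  induction m using Nat.strong_induction_on with
  | _ m ih =>
    intro acc
    rw [reqLoop.eq_def]
    by_cases hm : 0 < m
    · have hsh : ((m : Int) >>> (1 : Nat)) = ((m / 2 : Nat) : Int) := by
        rw [Int.shiftRight_eq_div_pow]
        push_cast
        omega
      rw [if_pos (by exact_mod_cast hm), hsh, ih (m / 2) (by omega)]
      rw [PySem.Int.bitLength_natCast hm]
      push_cast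
      ring
    · have hz : m = 0 := by omega
      subst hz
      simp [PySem.Int.bitLength_zero]

-- ===== VERDICT (by name: the statement is the Claim_ definition above) =====
theorem req_bytes_spec : Claim_equal_req_bytes := by
  intro n _
  unfold Spec_req_bytes req_bytes req_bytes_alt
  by_cases h : n < 1
  · simp [h]
  · rw [if_neg h, if_neg h]
    have hn : (0:Int) ≤ n := by omega
    have : n = ((n.toNat : Nat) : Int) := by omega
    rw [this, reqLoop_eq n.toNat 0]
    set L : Int := (PySem.Int.bitLength ((n.toNat : Nat) : Int) : Int) with hL
    have hL0 : 0 ≤ L := by positivity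
    rw [zero_add]
    have hq := PySem.Int.floordiv_mul_add_mod (L + 7) 8
    have hr0 := PySem.Int.mod_nonneg (L + 7) (b := 8) (by omega)
    have hr1 := PySem.Int.mod_lt (L + 7) (b := 8) (by omega)
    rw [PySem.Int.neg_floordiv_neg_eq_iff_of_pos (by omega)]
    constructor <;> omega
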